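-- pv_equiv track=rewrite | github.com/richardkyu/eliminatestars | game.py | get_nonzero
-- ===== SOURCE A (Python) =====
-- from collections import deque
-- from operator import eq
--
-- def find_similar(array, neighbors, start, BFS=True):
-- 	"""Run either a BFS or DFS algorithm to get the next node"""
-- 	match = get_item(array, start)
-- 	block = {start}
-- 	visit = deque(block)
--
-- 	child = None
-- 	if BFS:
-- 		child = deque.popleft
-- 	else:
-- 		child = deque.pop
--
-- 	nodes_found = []
--
-- 	while visit:
-- 		node = child(visit)
-- 		for offset in neighbors:
-- 			index = get_next(node, offset)
-- 			if index not in block: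
-- 				block.add(index)
-- 				if is_valid(array, index):
-- 					value = get_item(array, index)
-- 					if eq(value, match):
-- 						visit.append(index)
-- 		nodes_found += [node]
--
-- 	return nodes_found
--
-- def get_item(array, index):
-- 	"""Access the data structure based on the given position information."""
-- 	row, column = index
-- 	return array[row][column]
--
-- def get_next(node, offset):
-- 	"""Find the next location based on an offset from the current location."""
-- 	row, column = node
-- 	row_offset, column_offset = offset
-- 	return row + row_offset, column + column_offset
--
-- def is_valid(array, index):
-- 	"""Verify that the index is in range of the data structure's contents."""
-- 	row, column = index
-- 	return 0 <= row < len(array) and 0 <= column < len(array[row])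
--
-- def get_nonzero(array, neighbors):
-- 	nonzero = []
-- 	for x in range(len(array)):
-- 		for y in range(len(array[0])):
-- 			start = x, y
-- 			node_length = len(find_similar(array, neighbors, start, BFS=True))
-- 			if array[x][y]!=0 and node_length>=2:
-- 				nonzero.append([x,y])
-- 	return nonzero
-- ===== SOURCE B (Python) =====
-- def get_nonzero(array, neighbors):
--     # A cell belongs to an equal-value group of size >= 2 iff some single
--     # neighbor offset lands on a distinct in-range cell with the same value,
--     # so no BFS is needed: one local check per cell.
--     if not array:
--         return []
--     height, width = len(array), len(array[0])
--     result = []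
--     for x in range(height):
--         for y in range(width):
--             v = array[x][y]
--             if v != 0 and any(
--                 (dx, dy) != (0, 0)
--                 and 0 <= x + dx < height
--                 and 0 <= y + dy < len(array[x + dx])
--                 and array[x + dx][y + dy] == v
--                 for dx, dy in neighbors
--             ):
--                 result.append([x, y])
--     return result
-- ===== Notes on version B (the rewrite author's own statement) =====
-- stated objective: faster
-- what changed: Replaces the per-cell BFS flood fill (whose result length is only compared with 2) by a single local check: a cell is listed iff some neighbor offset lands on a distinct in-range cell of equal value.
import Mathlib
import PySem

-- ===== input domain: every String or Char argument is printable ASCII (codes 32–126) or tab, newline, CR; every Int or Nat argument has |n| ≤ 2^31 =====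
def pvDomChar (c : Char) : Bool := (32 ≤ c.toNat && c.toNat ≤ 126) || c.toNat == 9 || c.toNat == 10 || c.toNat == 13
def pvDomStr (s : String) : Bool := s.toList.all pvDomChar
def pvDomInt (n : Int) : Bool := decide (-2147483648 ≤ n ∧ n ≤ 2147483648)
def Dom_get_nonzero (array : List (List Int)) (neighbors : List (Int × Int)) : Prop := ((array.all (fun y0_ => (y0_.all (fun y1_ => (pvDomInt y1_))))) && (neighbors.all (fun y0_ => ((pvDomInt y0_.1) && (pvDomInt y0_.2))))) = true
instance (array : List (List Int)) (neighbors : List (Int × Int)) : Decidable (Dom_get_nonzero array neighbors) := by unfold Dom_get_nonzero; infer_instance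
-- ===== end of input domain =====

-- B replaces A's per-cell BFS (whose size is only compared with 2) by a single local
-- neighbor check per cell; asymptotically faster on grids with large equal-value regions.

-- ===== PORT A =====

-- array[row][column]; Python raises IndexError out of range — Pre_ excludes those inputs, getD 0 exact elsewhere
def get_item (array : List (List Int)) (index : Int × Int) : Int :=
  PySem.List.pyGetD (PySem.List.pyGetD array index.1 []) index.2 0

def get_next (node : Int × Int) (offset : Int × Int) : Int × Int :=
  (node.1 + offset.1, node.2 + offset.2)

def is_valid (array : List (List Int)) (index : Int × Int) : Bool :=
  decide (0 ≤ index.1) && decide (index.1 < (array.length : Int)) &&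
  decide (0 ≤ index.2) && decide (index.2 < ((PySem.List.pyGetD array index.1 []).length : Int))

-- the body of A's 'for offset in neighbors' loop: state (block, visit-remainder)
def scan_offsets (array : List (List Int)) (mtch : Int) (node : Int × Int)
    (bv : PySem.Set (Int × Int) × List (Int × Int)) (offset : Int × Int) :
    PySem.Set (Int × Int) × List (Int × Int) :=
  let index := get_next node offset
  if index ∈ bv.1 then bv
  else
    let block := PySem.Set.add bv.1 index
    if is_valid array index && (get_item array index == mtch) then
      (block, bv.2 ++ [index])
    else (block, bv.2)

-- A's 'while visit' loop (BFS=True: popleft). fuel only ensures termination; the loop runs at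
-- most 1 + (number of cells) times, so the given fuel never runs out and the port is exact.
def find_similar_loop (array : List (List Int)) (neighbors : List (Int × Int)) (mtch : Int) :
    Nat → PySem.Set (Int × Int) → List (Int × Int) → List (Int × Int) → List (Int × Int)
  | 0, _, _, nodes => nodes
  | _ + 1, _, [], nodes => nodes
  | fuel + 1, block, node :: rest, nodes =>
      let s := neighbors.foldl (scan_offsets array mtch node) (block, rest)
      find_similar_loop array neighbors mtch fuel s.1 s.2 (nodes ++ [node])

def find_similar (array : List (List Int)) (neighbors : List (Int × Int)) (start : Int × Int) :
    List (Int × Int) :=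
  let mtch := get_item array start
  find_similar_loop array neighbors mtch (1 + (array.map List.length).sum)
    (PySem.Set.ofList [start]) [start] []

def get_nonzero (array : List (List Int)) (neighbors : List (Int × Int)) : List (List Int) :=
  (PySem.List.pyRange 0 (array.length : Int) 1).foldl (fun nonzero x =>
    (PySem.List.pyRange 0 ((PySem.List.pyGetD array 0 []).length : Int) 1).foldl (fun nonzero y =>
      let start := (x, y)
      let node_length := (find_similar array neighbors start).length
      if PySem.List.pyGetD (PySem.List.pyGetD array x []) y 0 ≠ 0 ∧ node_length ≥ 2 then
        nonzero ++ [[x, y]]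
      else nonzero) nonzero) []

-- ===== PORT B =====

def get_nonzero_alt (array : List (List Int)) (neighbors : List (Int × Int)) : List (List Int) :=
  if array = [] then []
  else
    let height := (array.length : Int)
    let width := ((PySem.List.pyGetD array 0 []).length : Int)
    (PySem.List.pyRange 0 height 1).foldl (fun result x =>
      (PySem.List.pyRange 0 width 1).foldl (fun result y =>
        let v := PySem.List.pyGetD (PySem.List.pyGetD array x []) y 0
        if v ≠ 0 ∧ neighbors.any (fun o =>
            decide (o ≠ ((0 : Int), (0 : Int))) &&
            decide (0 ≤ x + o.1) && decide (x + o.1 < height) &&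
            decide (0 ≤ y + o.2) &&
            decide (y + o.2 < ((PySem.List.pyGetD array (x + o.1) []).length : Int)) &&
            (PySem.List.pyGetD (PySem.List.pyGetD array (x + o.1) []) (y + o.2) 0 == v)) = true then
          result ++ [[x, y]]
        else result) result) []

-- ===== PRECONDITION & SPEC =====
-- A (and B) raise IndexError on ragged input where some row is shorter than row 0; Pre_ excludes exactly that.
def Pre_get_nonzero (array : List (List Int)) (neighbors : List (Int × Int)) : Prop :=
  ∀ row ∈ array, (PySem.List.pyGetD array 0 []).length ≤ row.length
instance (array : List (List Int)) (neighbors : List (Int × Int)) : Decidable (Pre_get_nonzero array neighbors) := by unfold Pre_get_nonzero; infer_instance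
def pvWitness_get_nonzero : List (List Int) × (List (Int × Int)) :=
  ([[1, 0], [1, 2]], [(-1, 0), (1, 0), (0, -1), (0, 1)])

def Spec_get_nonzero (array : List (List Int)) (neighbors : List (Int × Int)) (out : List (List Int)) : Prop := out = get_nonzero_alt array neighbors
instance (array : List (List Int)) (neighbors : List (Int × Int)) (out : List (List Int)) : Decidable (Spec_get_nonzero array neighbors out) := by unfold Spec_get_nonzero; infer_instance

-- ===== CLAIM (what is proved, stated in full; the proofs are below) =====
def Claim_equal_get_nonzero : Prop := ∀ (array : List (List Int)) (neighbors : List (Int × Int)), Dom_get_nonzero array neighbors → Pre_get_nonzero array neighbors → Spec_get_nonzero array neighbors (get_nonzero array neighbors)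

-- ===== LEMMAS AND PROOFS =====

-- the per-index predicate A's BFS appends on
def goodB (array : List (List Int)) (mtch : Int) (i : Int × Int) : Bool :=
  is_valid array i && (get_item array i == mtch)

lemma loop_nil (array : List (List Int)) (nb : List (Int × Int)) (m : Int)
    (f : Nat) (b : PySem.Set (Int × Int)) (nodes : List (Int × Int)) :
    find_similar_loop array nb m f b [] nodes = nodes := by
  cases f <;> rfl

lemma loop_len_ge (array : List (List Int)) (nb : List (Int × Int)) (m : Int) :
    ∀ (f : Nat) (b : PySem.Set (Int × Int)) (visit nodes : List (Int × Int)),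
      nodes.length ≤ (find_similar_loop array nb m f b visit nodes).length := by
  intro f
  induction f with
  | zero => intro b visit nodes; simp [find_similar_loop]
  | succ f ih =>
    intro b visit nodes
    cases visit with
    | nil => simp [find_similar_loop]
    | cons node rest =>
      calc nodes.length ≤ (nodes ++ [node]).length := by simp
        _ ≤ _ := ih _ _ _

lemma fold_visit_ne (array : List (List Int)) (m : Int) (node : Int × Int) :
    ∀ (os : List (Int × Int)) (b : PySem.Set (Int × Int)) (v : List (Int × Int)),
      (os.foldl (scan_offsets array m node) (b, v)).2 ≠ [] ↔
        (v ≠ [] ∨ ∃ o ∈ os, goodB array m (get_next node o) = true ∧ get_next node o ∉ b) := by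
  intro os
  induction os with
  | nil => intro b v; simp
  | cons o os ih =>
    intro b v
    simp only [List.foldl_cons]
    by_cases hmem : get_next node o ∈ b
    · rw [show scan_offsets array m node (b, v) o = (b, v) by
        simp [scan_offsets, hmem]]
      rw [ih]
      constructor
      · rintro (h | ⟨o', ho', hg, hb⟩)
        · exact Or.inl h
        · exact Or.inr ⟨o', List.mem_cons_of_mem _ ho', hg, hb⟩
      · rintro (h | ⟨o', ho', hg, hb⟩)
        · exact Or.inl h
        · rcases List.mem_cons.mp ho' with rfl | ho'
          · exact absurd hmem hb
          · exact Or.inr ⟨o', ho', hg, hb⟩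
    · by_cases hg : goodB array m (get_next node o) = true
      · have hg' : (is_valid array (get_next node o) && (get_item array (get_next node o) == m)) = true := hg
        rw [show scan_offsets array m node (b, v) o
            = (PySem.Set.add b (get_next node o), v ++ [get_next node o]) by
          simp [scan_offsets, hmem, hg']]
        rw [ih]
        constructor
        · intro _; exact Or.inr ⟨o, List.mem_cons_self .., hg, hmem⟩
        · intro _; exact Or.inl (by simp)
      · have hg'' : (is_valid array (get_next node o) && (get_item array (get_next node o) == m)) = false := by
          simpa [goodB] using hg
        rw [show scan_offsets array m node (b, v) o
            = (PySem.Set.add b (get_next node o), v) by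
          simp [scan_offsets, hmem, hg'']]
        rw [ih]
        have hbadd : ∀ p, p ∈ PySem.Set.add b (get_next node o) ↔
            p ∈ b ∨ p = get_next node o := by
          intro p; simp [PySem.Set.add, hmem]
        constructor
        · rintro (h | ⟨o', ho', hg', hb⟩)
          · exact Or.inl h
          · refine Or.inr ⟨o', List.mem_cons_of_mem _ ho', hg', fun hmem' => hb ?_⟩
            rw [hbadd]; exact Or.inl hmem'
        · rintro (h | ⟨o', ho', hg', hb⟩)
          · exact Or.inl h
          · rcases List.mem_cons.mp ho' with rfl | ho'
            · exact absurd hg' hg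
            · refine Or.inr ⟨o', ho', hg', fun hmem' => ?_⟩
              rcases (hbadd _).mp hmem' with h | h
              · exact hb h
              · exact hg (h ▸ hg')
  
-- the size-≥-2 test on A's BFS is exactly "some offset hits a distinct good cell"
lemma find_similar_two_iff (array : List (List Int)) (nb : List (Int × Int)) (start : Int × Int)
    (hsum : 1 ≤ (array.map List.length).sum) :
    2 ≤ (find_similar array nb start).length ↔
      ∃ o ∈ nb, get_next start o ≠ start ∧
        goodB array (get_item array start) (get_next start o) = true := by
  obtain ⟨k, hk⟩ : ∃ k, (array.map List.length).sum = k + 1 :=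
    ⟨(array.map List.length).sum - 1, by omega⟩
  have hunf : find_similar array nb start = find_similar_loop array nb (get_item array start)
      (1 + (array.map List.length).sum) (PySem.Set.ofList [start]) [start] [] := rfl
  rw [hunf, hk, show 1 + (k + 1) = k + 2 by omega]
  have hstep : find_similar_loop array nb (get_item array start) (k + 2)
      (PySem.Set.ofList [start]) [start] []
      = find_similar_loop array nb (get_item array start) (k + 1)
          (nb.foldl (scan_offsets array (get_item array start) start)
            (PySem.Set.ofList [start], [])).1
          (nb.foldl (scan_offsets array (get_item array start) start)
            (PySem.Set.ofList [start], [])).2 [start] := rfl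
  rw [hstep]
  set s := nb.foldl (scan_offsets array (get_item array start) start)
      (PySem.Set.ofList [start], []) with hs
  have hiff := fold_visit_ne array (get_item array start) start nb (PySem.Set.ofList [start]) []
  rw [← hs] at hiff
  have hmem1 : ∀ p : Int × Int, p ∈ PySem.Set.ofList [start] ↔ p = start := by
    intro p; simp [PySem.Set.ofList, PySem.Set.add, PySem.Set.empty]
  constructor
  · intro h2
    cases hv : s.2 with
    | nil =>
      rw [hv, loop_nil] at h2; simp at h2
    | cons w ws =>
      have := (hiff.mp (by rw [hv]; simp))
      rcases this with h | ⟨o, ho, hg, hb⟩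
      · simp at h
      · exact ⟨o, ho, fun he => hb ((hmem1 _).mpr he), hg⟩
  · rintro ⟨o, ho, hne, hg⟩
    have hne' : s.2 ≠ [] := hiff.mpr (Or.inr ⟨o, ho, hg, fun h => hne ((hmem1 _).mp h)⟩)
    cases hv : s.2 with
    | nil => exact absurd hv hne'
    | cons w ws =>
      have : find_similar_loop array nb (get_item array start) (k + 1) s.1 (w :: ws) [start]
          = find_similar_loop array nb (get_item array start) k
              (nb.foldl (scan_offsets array (get_item array start) w) (s.1, ws)).1
              (nb.foldl (scan_offsets array (get_item array start) w) (s.1, ws)).2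
              ([start] ++ [w]) := rfl
      rw [this]
      calc (2 : Nat) = ([start] ++ [w]).length := by simp
        _ ≤ _ := loop_len_ge array nb (get_item array start) k _ _ _

-- per-cell: A's condition equals B's condition (for in-range x, y under Pre_)
lemma cell_cond_eq (array : List (List Int)) (neighbors : List (Int × Int))
    (pre : Pre_get_nonzero array neighbors) (x y : Int)
    (hx0 : 0 ≤ x) (hx : x < (array.length : Int))
    (hy0 : 0 ≤ y) (hy : y < ((PySem.List.pyGetD array 0 []).length : Int)) :
    ((PySem.List.pyGetD (PySem.List.pyGetD array x []) y 0 ≠ 0 ∧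
        (find_similar array neighbors (x, y)).length ≥ 2)
      ↔ (PySem.List.pyGetD (PySem.List.pyGetD array x []) y 0 ≠ 0 ∧
          neighbors.any (fun o =>
            decide (o ≠ ((0 : Int), (0 : Int))) &&
            decide (0 ≤ x + o.1) && decide (x + o.1 < (array.length : Int)) &&
            decide (0 ≤ y + o.2) &&
            decide (y + o.2 < ((PySem.List.pyGetD array (x + o.1) []).length : Int)) &&
            (PySem.List.pyGetD (PySem.List.pyGetD array (x + o.1) []) (y + o.2) 0
              == PySem.List.pyGetD (PySem.List.pyGetD array x []) y 0)) = true)) := by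
  have hsum : 1 ≤ (array.map List.length).sum := by
    have hxmem : PySem.List.pyGetD array x [] ∈ array := by
      apply PySem.List.pyGetD_mem
      exact ⟨by omega, by omega⟩
    have h1 : 1 ≤ (PySem.List.pyGetD array x []).length := by
      have := pre _ hxmem; omega
    have : (PySem.List.pyGetD array x []).length ≤ (array.map List.length).sum := by
      have := List.le_sum_of_mem (List.mem_map_of_mem (f := List.length) hxmem)
      simpa using this
    omega
  have hitem : get_item array (x, y) = PySem.List.pyGetD (PySem.List.pyGetD array x []) y 0 := rfl
  apply and_congr_right
  intro _
  rw [ge_iff_le, find_similar_two_iff array neighbors (x, y) hsum, List.any_eq_true]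
  constructor
  · rintro ⟨o, ho, hne, hg⟩
    refine ⟨o, ho, ?_⟩
    simp only [goodB, is_valid, get_item, get_next, Bool.and_eq_true, decide_eq_true_eq] at hg
    obtain ⟨⟨⟨⟨h1, h2⟩, h3⟩, h4⟩, h5⟩ := hg
    have hone : o ≠ ((0 : Int), (0 : Int)) := by
      intro h; apply hne; rw [h]; simp [get_next]
    simp only [Bool.and_eq_true, decide_eq_true_eq]
    exact ⟨⟨⟨⟨⟨hone, h1⟩, h2⟩, h3⟩, h4⟩, h5⟩
  · rintro ⟨o, ho, hb⟩
    simp only [Bool.and_eq_true, decide_eq_true_eq] at hb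
    obtain ⟨⟨⟨⟨⟨hone, h1⟩, h2⟩, h3⟩, h4⟩, h5⟩ := hb
    refine ⟨o, ho, ?_, ?_⟩
    · intro h
      apply hone
      have h1' : x + o.1 = x := congrArg Prod.fst h
      have h2' : y + o.2 = y := congrArg Prod.snd h
      have : o.1 = 0 := by omega
      have : o.2 = 0 := by omega
      exact Prod.ext (by omega) (by omega)
    · simp only [goodB, is_valid, get_item, get_next, Bool.and_eq_true, decide_eq_true_eq]
      exact ⟨⟨⟨⟨h1, h2⟩, h3⟩, h4⟩, h5⟩

-- ===== VERDICT (by name: the statement is the Claim_ definition above) =====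
theorem get_nonzero_spec : Claim_equal_get_nonzero := by
  intro array neighbors _ pre
  unfold Spec_get_nonzero get_nonzero get_nonzero_alt
  by_cases harr : array = []
  · subst harr; simp [PySem.List.pyRange_one_eq_nil]
  · rw [if_neg harr]
    apply PySem.List.foldl_congr_mem
    intro acc x hxmem
    rw [PySem.List.mem_pyRange_one] at hxmem
    apply PySem.List.foldl_congr_mem
    intro acc2 y hymem
    rw [PySem.List.mem_pyRange_one] at hymem
    have := cell_cond_eq array neighbors pre x y hxmem.1 hxmem.2 hymem.1 hymem.2
    simp only []
    split_ifs with h1 h2 h2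
    · rfl
    · exact absurd (this.mp h1) h2
    · exact absurd (this.mpr h2) h1
    · rfl
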